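-- pv_equiv track=rewrite | github.com/othorai/backend-narrative-and-datasource | app/routers/narrative.py | detect_metric_patterns
-- ===== SOURCE A (Python) =====
-- from typing import Dict, List, Optional, Any, Tuple
--
-- def detect_metric_patterns(metric_name: str) -> Dict[str, bool]:
--     """Detect patterns in metric name to understand its nature."""
--     name_lower = metric_name.lower()
--     words = set(name_lower.split('_'))
--
--     # Define pattern categories dynamically
--     pattern_categories = {
--         'time_based': {'time', 'duration', 'period', 'frequency', 'interval'},
--         'financial': {'revenue', 'cost', 'price', 'spend', 'budget', 'sales', 'monetary'},
--         'percentage_based': {'percentage', 'ratio', 'rate', 'share', 'proportion'},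
--         'count_based': {'count', 'total', 'number', 'quantity', 'sum'},
--         'satisfaction': {'satisfaction', 'rating', 'score', 'feedback', 'review'},
--         'performance': {'performance', 'efficiency', 'productivity', 'output'},
--         'growth': {'growth', 'increase', 'decrease', 'change', 'delta'},
--         'customer': {'customer', 'client', 'user', 'subscriber', 'member'}
--     }
--
--     # Check which patterns match
--     patterns = {
--         f'is_{category}': bool(words & pattern_words)
--         for category, pattern_words in pattern_categories.items()
--     }
--
--     return patterns
-- ===== SOURCE B (Python) =====
-- # B replaces the per-category set intersections by one bitmask pass:
-- # each keyword maps to a category bit, the words fold into one integer mask,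
-- # and the eight flags are read off the mask's bits.
-- _NAMES = ['time_based', 'financial', 'percentage_based', 'count_based',
--           'satisfaction', 'performance', 'growth', 'customer']
--
-- _KEYWORD_BIT = {
--     'time': 1, 'duration': 1, 'period': 1, 'frequency': 1, 'interval': 1,
--     'revenue': 2, 'cost': 2, 'price': 2, 'spend': 2, 'budget': 2, 'sales': 2, 'monetary': 2,
--     'percentage': 4, 'ratio': 4, 'rate': 4, 'share': 4, 'proportion': 4,
--     'count': 8, 'total': 8, 'number': 8, 'quantity': 8, 'sum': 8,
--     'satisfaction': 16, 'rating': 16, 'score': 16, 'feedback': 16, 'review': 16,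
--     'performance': 32, 'efficiency': 32, 'productivity': 32, 'output': 32,
--     'growth': 64, 'increase': 64, 'decrease': 64, 'change': 64, 'delta': 64,
--     'customer': 128, 'client': 128, 'user': 128, 'subscriber': 128, 'member': 128,
-- }
--
-- def detect_metric_patterns(metric_name: str):
--     """Detect patterns in metric name to understand its nature."""
--     mask = 0
--     for w in metric_name.lower().split('_'):
--         mask |= _KEYWORD_BIT.get(w, 0)
--     result = {}
--     bit = 1
--     for name in _NAMES:
--         result['is_' + name] = bool(mask & bit)
--         bit <<= 1
--     return result
-- ===== Notes on version B (the rewrite author's own statement) =====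
-- stated objective: alternative
-- what changed: A intersects the word set with each of the 8 category keyword sets; B maps each keyword to a category bit, ORs the bits of all words into a single integer mask in one pass, and reads the eight flags off the mask's bits.
import Mathlib
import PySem

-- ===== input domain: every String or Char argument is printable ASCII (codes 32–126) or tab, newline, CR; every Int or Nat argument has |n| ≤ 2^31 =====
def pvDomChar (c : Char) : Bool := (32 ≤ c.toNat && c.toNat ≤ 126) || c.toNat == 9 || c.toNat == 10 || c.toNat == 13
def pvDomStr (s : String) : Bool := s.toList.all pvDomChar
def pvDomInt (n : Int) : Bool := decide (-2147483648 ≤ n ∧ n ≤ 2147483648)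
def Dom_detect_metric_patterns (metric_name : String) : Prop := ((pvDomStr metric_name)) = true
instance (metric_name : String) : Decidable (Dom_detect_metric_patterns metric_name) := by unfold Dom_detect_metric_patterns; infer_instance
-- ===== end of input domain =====

-- B replaces A's per-category set intersections by one bitmask pass: each keyword carries a
-- category bit, the words OR into one integer mask, and the eight flags are the mask's bits (alternative).

-- ===== PORT A =====
def detect_metric_patterns (metric_name : String) : List (String × Bool) :=
  let name_lower := PySem.Str.lower metric_name
  let words : PySem.Set String := PySem.Set.ofList ((PySem.Str.split? name_lower "_").getD [])  -- sep "_" ≠ "": split? is always some here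
  let pattern_categories : List (String × PySem.Set String) := [
    ("time_based", PySem.Set.ofList ["time", "duration", "period", "frequency", "interval"]),
    ("financial", PySem.Set.ofList ["revenue", "cost", "price", "spend", "budget", "sales", "monetary"]),
    ("percentage_based", PySem.Set.ofList ["percentage", "ratio", "rate", "share", "proportion"]),
    ("count_based", PySem.Set.ofList ["count", "total", "number", "quantity", "sum"]),
    ("satisfaction", PySem.Set.ofList ["satisfaction", "rating", "score", "feedback", "review"]),
    ("performance", PySem.Set.ofList ["performance", "efficiency", "productivity", "output"]),
    ("growth", PySem.Set.ofList ["growth", "increase", "decrease", "change", "delta"]),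
    ("customer", PySem.Set.ofList ["customer", "client", "user", "subscriber", "member"])]
  pattern_categories.map (fun p => ("is_" ++ p.1, !(PySem.Set.inter words p.2).isEmpty))

-- ===== PORT B =====
def pvNames : List String :=
  ["time_based", "financial", "percentage_based", "count_based",
   "satisfaction", "performance", "growth", "customer"]

def pvKwBit : PySem.Dict String Nat := PySem.Dict.ofList [
  ("time", 1), ("duration", 1), ("period", 1), ("frequency", 1), ("interval", 1),
  ("revenue", 2), ("cost", 2), ("price", 2), ("spend", 2), ("budget", 2), ("sales", 2), ("monetary", 2),
  ("percentage", 4), ("ratio", 4), ("rate", 4), ("share", 4), ("proportion", 4),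
  ("count", 8), ("total", 8), ("number", 8), ("quantity", 8), ("sum", 8),
  ("satisfaction", 16), ("rating", 16), ("score", 16), ("feedback", 16), ("review", 16),
  ("performance", 32), ("efficiency", 32), ("productivity", 32), ("output", 32),
  ("growth", 64), ("increase", 64), ("decrease", 64), ("change", 64), ("delta", 64),
  ("customer", 128), ("client", 128), ("user", 128), ("subscriber", 128), ("member", 128)]

def detect_metric_patterns_alt (metric_name : String) : List (String × Bool) :=
  let mask : Nat :=
    ((PySem.Str.split? (PySem.Str.lower metric_name) "_").getD []).foldl  -- sep "_" ≠ "": split? is always some here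
      (fun acc w => acc ||| pvKwBit.getD w 0) 0
  -- 'result = {}; bit = 1; for name in _NAMES: result['is_'+name] = bool(mask & bit); bit <<= 1'
  (pvNames.foldl (fun st name => ((st.1 ++ [("is_" ++ name, decide (mask &&& st.2 ≠ 0))]), st.2 <<< 1))
    (([] : List (String × Bool)), (1 : Nat))).1

-- ===== PRECONDITION & SPEC =====
def Spec_detect_metric_patterns (metric_name : String) (out : List (String × Bool)) : Prop := out = detect_metric_patterns_alt metric_name
instance (metric_name : String) (out : List (String × Bool)) : Decidable (Spec_detect_metric_patterns metric_name out) := by unfold Spec_detect_metric_patterns; infer_instance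

-- ===== CLAIM (what is proved, stated in full; the proofs are below) =====
def Claim_equal_detect_metric_patterns : Prop := ∀ (metric_name : String), Dom_detect_metric_patterns metric_name → Spec_detect_metric_patterns metric_name (detect_metric_patterns metric_name)

-- ===== LEMMAS AND PROOFS =====

-- items of B's keyword→bit dict, as a literal association list
def pvItems : List (String × Nat) := [
  ("time", 1), ("duration", 1), ("period", 1), ("frequency", 1), ("interval", 1),
  ("revenue", 2), ("cost", 2), ("price", 2), ("spend", 2), ("budget", 2), ("sales", 2), ("monetary", 2),
  ("percentage", 4), ("ratio", 4), ("rate", 4), ("share", 4), ("proportion", 4),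
  ("count", 8), ("total", 8), ("number", 8), ("quantity", 8), ("sum", 8),
  ("satisfaction", 16), ("rating", 16), ("score", 16), ("feedback", 16), ("review", 16),
  ("performance", 32), ("efficiency", 32), ("productivity", 32), ("output", 32),
  ("growth", 64), ("increase", 64), ("decrease", 64), ("change", 64), ("delta", 64),
  ("customer", 128), ("client", 128), ("user", 128), ("subscriber", 128), ("member", 128)]

set_option maxRecDepth 40000 in
lemma pvKwBit_items : pvKwBit.items = pvItems := by rfl

set_option maxRecDepth 40000 in
lemma pvKwBit_keys_nodup : pvKwBit.keys.Nodup := by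
  have h : pvKwBit.keys = pvItems.map (·.1) := by
    rw [show pvKwBit.keys = pvKwBit.items.map (·.1) from rfl, pvKwBit_items]
  rw [h]; decide

lemma kwbit_some (w : String) (v : Nat) : pvKwBit.get? w = some v ↔ (w, v) ∈ pvItems := by
  rw [PySem.Dict.get?_eq_some_iff_mem_items _ _ _ pvKwBit_keys_nodup, pvKwBit_items]

-- bit i of the final mask ↔ some word's keyword bit has bit i
lemma mask_testBit (ws : List String) (acc : Nat) (i : Nat) :
    (ws.foldl (fun a w => a ||| pvKwBit.getD w 0) acc).testBit i
      ↔ acc.testBit i ∨ ∃ w ∈ ws, (pvKwBit.getD w 0).testBit i := by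
  induction ws generalizing acc with
  | nil => simp
  | cons w ws ih =>
    simp only [List.foldl_cons, ih, Nat.testBit_or, Bool.or_eq_true, List.mem_cons]
    constructor
    · rintro ((h | h) | ⟨x, hx, he⟩)
      · exact Or.inl h
      · exact Or.inr ⟨w, Or.inl rfl, h⟩
      · exact Or.inr ⟨x, Or.inr hx, he⟩
    · rintro (h | ⟨x, rfl | hx, he⟩)
      · exact Or.inl (Or.inl h)
      · exact Or.inl (Or.inr he)
      · exact Or.inr ⟨x, hx, he⟩

-- one flag: A's set-intersection test equals B's bit test on the mask
lemma flag_eq (ws : List String) (i : Nat) (kws : List String)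
    (hc : ∀ w v, (w, v) ∈ pvItems → (v.testBit i ↔ w ∈ kws))
    (hk : ∀ w ∈ kws, ∃ v, (w, v) ∈ pvItems) :
    (!(PySem.Set.inter (PySem.Set.ofList ws) (PySem.Set.ofList kws)).isEmpty)
      = decide ((ws.foldl (fun a w => a ||| pvKwBit.getD w 0) 0) &&& (1 <<< i) ≠ 0) := by
  have hbit : ∀ (m : Nat), (m &&& (1 <<< i) ≠ 0) ↔ m.testBit i := by
    intro m
    rw [Nat.one_shiftLeft, Nat.and_two_pow]
    cases h : m.testBit i <;> simp
  rw [Bool.eq_iff_iff]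
  simp only [Bool.not_eq_true', List.isEmpty_eq_false_iff_exists_mem, decide_eq_true_eq,
    PySem.Set.mem_inter, PySem.Set.mem_ofList, hbit, mask_testBit, Nat.zero_testBit,
    Bool.false_eq_true, false_or]
  constructor
  · rintro ⟨w, hw, hmem⟩
    obtain ⟨v, hv⟩ := hk w hmem
    refine ⟨w, hw, ?_⟩
    rw [PySem.Dict.getD_of_get?_eq_some _ _ ((kwbit_some w v).mpr hv)]
    exact (hc w v hv).mpr hmem
  · rintro ⟨w, hw, hb⟩
    refine ⟨w, hw, ?_⟩
    cases hg : pvKwBit.get? w with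
    | none => rw [PySem.Dict.getD_of_get?_eq_none _ _ hg] at hb; simp at hb
    | some v =>
      rw [PySem.Dict.getD_of_get?_eq_some _ _ hg] at hb
      exact (hc w v ((kwbit_some w v).mp hg)).mp hb

-- proof-side name for B's mask
def pvMask (m : String) : Nat :=
  ((PySem.Str.split? (PySem.Str.lower m) "_").getD []).foldl
    (fun a w => a ||| pvKwBit.getD w 0) 0

set_option maxRecDepth 40000 in
theorem detect_metric_patterns_spec_aux (m : String) :
    detect_metric_patterns m = detect_metric_patterns_alt m := by
  have halt : detect_metric_patterns_alt m = [
      ("is_time_based", decide (pvMask m &&& (1 <<< 0) ≠ 0)),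
      ("is_financial", decide (pvMask m &&& (1 <<< 1) ≠ 0)),
      ("is_percentage_based", decide (pvMask m &&& (1 <<< 2) ≠ 0)),
      ("is_count_based", decide (pvMask m &&& (1 <<< 3) ≠ 0)),
      ("is_satisfaction", decide (pvMask m &&& (1 <<< 4) ≠ 0)),
      ("is_performance", decide (pvMask m &&& (1 <<< 5) ≠ 0)),
      ("is_growth", decide (pvMask m &&& (1 <<< 6) ≠ 0)),
      ("is_customer", decide (pvMask m &&& (1 <<< 7) ≠ 0))] := by
    rfl
  rw [halt]
  simp only [detect_metric_patterns, List.map_cons, List.map_nil, List.cons.injEq,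
    Prod.mk.injEq, and_true]
  refine ⟨⟨rfl, ?_⟩, ⟨rfl, ?_⟩, ⟨rfl, ?_⟩, ⟨rfl, ?_⟩, ⟨rfl, ?_⟩, ⟨rfl, ?_⟩, ⟨rfl, ?_⟩, ⟨rfl, ?_⟩⟩ <;>
    exact flag_eq _ _ _
      (by intro w v hv; fin_cases hv <;> decide)
      (by intro w hw; fin_cases hw <;> first
        | exact ⟨1, by decide⟩ | exact ⟨2, by decide⟩ | exact ⟨4, by decide⟩
        | exact ⟨8, by decide⟩ | exact ⟨16, by decide⟩ | exact ⟨32, by decide⟩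
        | exact ⟨64, by decide⟩ | exact ⟨128, by decide⟩)

-- ===== VERDICT (by name: the statement is the Claim_ definition above) =====
theorem detect_metric_patterns_spec : Claim_equal_detect_metric_patterns := by
  intro m _
  exact detect_metric_patterns_spec_aux m
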